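-- pv_equiv track=rewrite | github.com/sensille/litehm2 | hostmot2.py | calc_ports
-- ===== SOURCE A (Python) =====
-- def calc_ports(npins):
--     valid_widths = [17, 19, 21, 24, 27, 29, 30, 32]
--     best_n = None
--     best_w = None
--
--     for n in range(1, 9):
--         for w in valid_widths:
--             if n * w >= npins and (best_n is None
--                     or n * w < best_n * best_w):
--                 best_n = n
--                 best_w = w
--
--     if best_n * best_w != npins:
--         raise ValueError(("invalid number of pins. Have {} pins. Best match" +
--             " would be {} pins.").format(npins, best_n * best_w))
--
--     return best_n, best_w
-- ===== SOURCE B (Python) =====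
-- def calc_ports(npins):
--     valid_widths = [17, 19, 21, 24, 27, 29, 30, 32]
--     cands = []
--     for w in valid_widths:
--         n = max(1, -((-npins) // w))  # integer ceil(npins / w), at least 1
--         if n <= 8:
--             cands.append((n * w, n, w))
--     best = min(cands) if cands else None
--     if best is None or best[0] != npins:
--         raise ValueError(("invalid number of pins. Have {} pins. Best match" +
--             " would be {} pins.").format(npins, best[0] if best else None))
--     return best[1], best[2]
-- ===== Notes on version B (the rewrite author's own statement) =====
-- stated objective: simpler
-- what changed: Replaces A's 64-iteration nested scan with running best by a single pass over the 8 valid widths, computing the minimal port count per width arithmetically via an integer ceiling and taking the lexicographic minimum of the candidates.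
import Mathlib
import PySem

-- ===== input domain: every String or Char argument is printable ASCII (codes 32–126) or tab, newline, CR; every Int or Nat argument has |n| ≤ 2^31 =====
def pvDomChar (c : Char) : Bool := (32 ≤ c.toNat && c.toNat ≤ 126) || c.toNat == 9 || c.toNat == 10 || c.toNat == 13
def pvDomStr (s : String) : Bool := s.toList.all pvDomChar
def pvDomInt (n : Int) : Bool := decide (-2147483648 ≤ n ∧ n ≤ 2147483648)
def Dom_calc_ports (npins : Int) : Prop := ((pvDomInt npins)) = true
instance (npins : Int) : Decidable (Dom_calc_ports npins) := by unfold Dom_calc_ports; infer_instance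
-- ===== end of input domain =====

-- B replaces A's 64-pair nested scan by one pass over the 8 widths, computing the minimal port
-- count arithmetically (integer ceiling) per width and taking the lexicographic minimum (simpler).

-- ===== PORT A =====
-- literal transliteration of A: nested loops n = 1..8, w over valid_widths, keeping the first
-- strictly smaller product; the final ValueError/TypeError raises are outside Pre_ (port returns (0,0) there).
def calc_ports (npins : Int) : Int × Int :=
  let valid_widths : List Int := [17, 19, 21, 24, 27, 29, 30, 32]
  let best : Option (Int × Int) :=
    (PySem.List.pyRange 1 9 1).foldl (fun best n =>
      valid_widths.foldl (fun best w =>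
        if decide (n * w ≥ npins) &&
           (match best with
            | none => true
            | some (bn, bw) => decide (n * w < bn * bw)) then
          some (n, w)
        else best) best) none
  match best with
  | some (bn, bw) => if bn * bw = npins then (bn, bw) else (0, 0)  -- else: ValueError, excluded by Pre_
  | none => (0, 0)  -- None * None: TypeError, excluded by Pre_

-- ===== PORT B =====
-- a < b for Python tuple comparison on (product, n, w)
def pvTripleLt (a b : Int × Int × Int) : Bool :=
  decide (a.1 < b.1) ||
    (decide (a.1 = b.1) &&
      (decide (a.2.1 < b.2.1) || (decide (a.2.1 = b.2.1) && decide (a.2.2 < b.2.2))))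

def calc_ports_alt (npins : Int) : Int × Int :=
  let valid_widths : List Int := [17, 19, 21, 24, 27, 29, 30, 32]
  let cands : List (Int × Int × Int) := valid_widths.filterMap (fun w =>
    let n := max 1 (-(PySem.Int.floordiv (-npins) w))
    if n ≤ 8 then some (n * w, n, w) else none)
  -- min(cands): first lexicographically least triple
  let best : Option (Int × Int × Int) :=
    cands.foldl (fun acc c =>
      match acc with
      | none => some c
      | some b => if pvTripleLt c b then some c else acc) none
  match best with
  | some (p, n, w) => if p = npins then (n, w) else (0, 0)  -- else: ValueError, excluded by Pre_
  | none => (0, 0)  -- ValueError, excluded by Pre_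

-- ===== PRECONDITION & SPEC =====
-- Pre_ holds exactly when npins is achievable as n*w (1 ≤ n ≤ 8, w a valid width);
-- everywhere else A raises (ValueError, or TypeError for npins > 256).
def Pre_calc_ports (npins : Int) : Prop :=
  ∃ n ∈ ([1, 2, 3, 4, 5, 6, 7, 8] : List Int),
    ∃ w ∈ ([17, 19, 21, 24, 27, 29, 30, 32] : List Int), n * w = npins
instance (npins : Int) : Decidable (Pre_calc_ports npins) := by unfold Pre_calc_ports; infer_instance
def pvWitness_calc_ports : Int := 32

def Spec_calc_ports (npins : Int) (out : Int × Int) : Prop := out = calc_ports_alt npins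
instance (npins : Int) (out : Int × Int) : Decidable (Spec_calc_ports npins out) := by unfold Spec_calc_ports; infer_instance

-- ===== CLAIM (what is proved, stated in full; the proofs are below) =====
def Claim_equal_calc_ports : Prop := ∀ (npins : Int), Dom_calc_ports npins → Pre_calc_ports npins → Spec_calc_ports npins (calc_ports npins)

-- ===== LEMMAS AND PROOFS =====

-- ===== VERDICT (by name: the statement is the Claim_ definition above) =====
set_option maxRecDepth 4000 in
theorem calc_ports_spec : Claim_equal_calc_ports := by
  intro npins _ hpre
  obtain ⟨n, hn, w, hw, heq⟩ := hpre
  subst heq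
  fin_cases hn <;> fin_cases hw <;> decide
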